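-- pv_equiv track=rewrite | github.com/Lance52259/hcbp-scripts-lint | rules/st_rules/rule_003.py | _split_into_code_sections
-- ===== SOURCE A (Python) =====
-- from typing import Callable, List, Tuple, Optional, Dict
--
-- def _split_into_code_sections(block_lines: List[str]) -> List[List[Tuple[str, int]]]:
--     """
--     Split code block by empty lines and object boundaries into multiple sections.
--
--     Args:
--         block_lines (List[str]): Lines within a code block
--
--     Returns:
--         List[List[Tuple[str, int]]]: Sections with (line_content, line_index) tuples
--     """
--     sections = []
--     current_section = []
--     brace_level = 0
--     bracket_level = 0
--
--     for line_idx, line in enumerate(block_lines):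
--         stripped_line = line.strip()
--
--         if stripped_line == '':
--             # Empty line always splits sections, regardless of brace/bracket level
--             if current_section:
--                 sections.append(current_section)
--                 current_section = []
--             continue
--         elif stripped_line.startswith('#'):
--             # Skip comment lines but don't split sections
--             continue
--         else:
--             # Track brace and bracket levels before processing
--             for char in line:
--                 if char == '{':
--                     brace_level += 1
--                 elif char == '}':
--                     brace_level -= 1
--                 elif char == '[':
--                     bracket_level += 1
--                 elif char == ']':
--                     bracket_level -= 1
--
--             # Check if we're entering an object (parameter = { form)
--             # When encountering '{', enter a new grouping
--             if brace_level == 1 and stripped_line.endswith('{'):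
--                 # Check if this is a simple "parameter = {" form
--                 if '=' in stripped_line:
--                     after_equals = stripped_line.split('=', 1)[1].strip()
--                     if after_equals == '{':
--                         # Entering object grouping
--                         current_section.append((line, line_idx))
--                         sections.append(current_section)
--                         current_section = []
--                         continue
--
--             # Check if we're entering an array (parameter = [ form)
--             # When encountering '[', enter a new grouping
--             if bracket_level == 1 and stripped_line.endswith('['):
--                 # Check if this is a simple "parameter = [" form
--                 if '=' in stripped_line:
--                     after_equals = stripped_line.split('=', 1)[1].strip()
--                     if after_equals == '[':
--                         # Entering array grouping
--                         current_section.append((line, line_idx))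
--                         sections.append(current_section)
--                         current_section = []
--                         continue
--
--             # Check if we're in an array and encountering a standalone '{' (new object element)
--             # This happens in structures like: default = [ { ... }, { ... } ]
--             if bracket_level >= 1 and stripped_line == '{' and '=' not in stripped_line:
--                 # Starting a new object within an array
--                 if current_section:
--                     sections.append(current_section)
--                     current_section = []
--
--             # Check if we're exiting an object
--             if brace_level == 0 and stripped_line == '}':
--                 # Exiting object grouping
--                 if current_section:
--                     sections.append(current_section)
--                     current_section = []
--
--             # Check if we're exiting an array
--             if bracket_level == 0 and stripped_line == ']':
--                 # Exiting array grouping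
--                 if current_section:
--                     sections.append(current_section)
--                     current_section = []
--
--             # Add line to current section
--             current_section.append((line, line_idx))
--
--     # Add final section if exists
--     if current_section:
--         sections.append(current_section)
--
--     return sections
-- ===== SOURCE B (Python) =====
-- from typing import List, Tuple
--
-- def _after_equals_is(stripped: str, opener: str) -> bool:
--     """True for a simple 'parameter = {' / 'parameter = [' form."""
--     return '=' in stripped and stripped.split('=', 1)[1].strip() == opener
--
-- def _split_into_code_sections(block_lines: List[str]) -> List[List[Tuple[str, int]]]:
--     # Pass 1: cumulative (brace, bracket) nesting AFTER each line; blank and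
--     # comment lines carry the previous levels forward.
--     levels = []
--     brace = bracket = 0
--     for line in block_lines:
--         stripped = line.strip()
--         if stripped != '' and not stripped.startswith('#'):
--             brace += sum((c == '{') - (c == '}') for c in line)
--             bracket += sum((c == '[') - (c == ']') for c in line)
--         levels.append((brace, bracket))
--
--     # Pass 2: split decisions, reading the precomputed levels.
--     sections = []
--     current = []
--     for idx, line in enumerate(block_lines):
--         stripped = line.strip()
--         if stripped == '':
--             if current:
--                 sections.append(current)
--                 current = []
--         elif stripped.startswith('#'):
--             pass
--         else:
--             brace, bracket = levels[idx]
--             if (brace == 1 and stripped.endswith('{') and _after_equals_is(stripped, '{')) or \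
--                (bracket == 1 and stripped.endswith('[') and _after_equals_is(stripped, '[')):
--                 # entering an object/array grouping: line closes the section
--                 current.append((line, idx))
--                 sections.append(current)
--                 current = []
--             else:
--                 if current and ((bracket >= 1 and stripped == '{') or
--                                 (brace == 0 and stripped == '}') or
--                                 (bracket == 0 and stripped == ']')):
--                     sections.append(current)
--                     current = []
--                 current.append((line, idx))
--     if current:
--         sections.append(current)
--     return sections
-- ===== Notes on version B (the rewrite author's own statement) =====
-- stated objective: alternative
-- what changed: A's single interleaved pass with mutable brace/bracket counters (a char loop and three sequential boundary flushes inline in the section loop) is replaced by a two-pass decomposition: pass 1 tabulates the cumulative nesting levels after each line, pass 2 makes the split decisions from that table with one combined flush condition.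
import Mathlib
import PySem

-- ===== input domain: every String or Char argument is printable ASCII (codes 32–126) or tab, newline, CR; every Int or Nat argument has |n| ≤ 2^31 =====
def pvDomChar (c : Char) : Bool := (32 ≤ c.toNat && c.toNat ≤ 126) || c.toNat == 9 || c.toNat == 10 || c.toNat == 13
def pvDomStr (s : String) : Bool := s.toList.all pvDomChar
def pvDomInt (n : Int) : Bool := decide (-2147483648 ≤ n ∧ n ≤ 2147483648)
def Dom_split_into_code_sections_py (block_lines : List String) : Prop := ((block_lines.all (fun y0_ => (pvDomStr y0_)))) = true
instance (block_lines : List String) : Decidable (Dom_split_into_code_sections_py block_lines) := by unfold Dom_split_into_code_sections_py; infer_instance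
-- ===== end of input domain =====

-- B replaces A's single interleaved pass (mutable brace/bracket counters updated by a
-- char loop inside the section loop) by a two-pass decomposition: pass 1 tabulates the
-- cumulative nesting levels after each line, pass 2 makes the split decisions from the
-- table (objective: alternative decomposition, same cost).

-- ===== PORT A =====
-- stripped_line.split('=', 1)[1].strip() — A evaluates it only under '"=" in stripped_line',
-- where split('=', 1) has exactly two pieces, so the [1] lookup (ported with getD) is exact.
def pvAfterEqualsA (stripped : String) : String :=
  PySem.Str.strip (((PySem.Str.splitMax? stripped "=" 1).getD []).getD 1 "")

-- 'if <boundary cond>: if current_section: sections.append(current_section); current_section = []'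
def pvFlushIf (cond : Prop) [Decidable cond] (st : List (List (String × Int)) × List (String × Int)) :
    List (List (String × Int)) × List (String × Int) :=
  if cond ∧ st.2 ≠ [] then (st.1 ++ [st.2], []) else st

-- the 'for char in line' counter updates
def pvCharScanA (levels : Int × Int) (c : Char) : Int × Int :=
  if c = '{' then (levels.1 + 1, levels.2)
  else if c = '}' then (levels.1 - 1, levels.2)
  else if c = '[' then (levels.1, levels.2 + 1)
  else if c = ']' then (levels.1, levels.2 - 1)
  else levels

-- loop body of A; state = (sections, current_section, brace_level, bracket_level)
def pvStepA (st : List (List (String × Int)) × List (String × Int) × Int × Int)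
    (p : Int × String) : List (List (String × Int)) × List (String × Int) × Int × Int :=
  let sections := st.1
  let current := st.2.1
  let line_idx := p.1
  let line := p.2
  let stripped := PySem.Str.strip line
  if stripped = "" then
    (if current ≠ [] then (sections ++ [current], [], st.2.2.1, st.2.2.2) else st)
  else if PySem.Str.startswith stripped "#" = true then st
  else
    let lv := line.toList.foldl pvCharScanA (st.2.2.1, st.2.2.2)
    let brace_level := lv.1
    let bracket_level := lv.2
    if brace_level = 1 ∧ PySem.Str.endswith stripped "{" = true ∧
        PySem.Str.isIn "=" stripped = true ∧ pvAfterEqualsA stripped = "{" then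
      (sections ++ [current ++ [(line, line_idx)]], [], brace_level, bracket_level)
    else if bracket_level = 1 ∧ PySem.Str.endswith stripped "[" = true ∧
        PySem.Str.isIn "=" stripped = true ∧ pvAfterEqualsA stripped = "[" then
      (sections ++ [current ++ [(line, line_idx)]], [], brace_level, bracket_level)
    else
      let s3 := pvFlushIf (bracket_level = 0 ∧ stripped = "]")
        (pvFlushIf (brace_level = 0 ∧ stripped = "}")
          (pvFlushIf (bracket_level ≥ 1 ∧ stripped = "{" ∧ PySem.Str.isIn "=" stripped = false)
            (sections, current)))
      (s3.1, s3.2 ++ [(line, line_idx)], brace_level, bracket_level)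

def split_into_code_sections_py (block_lines : List String) : List (List (String × Int)) :=
  let st := (PySem.List.enumerate block_lines 0).foldl pvStepA ([], [], 0, 0)
  if st.2.1 ≠ [] then st.1 ++ [st.2.1] else st.1

-- ===== PORT B =====
-- '=' in stripped and stripped.split('=', 1)[1].strip() == opener
def pvAfterEqualsIs (stripped opener : String) : Bool :=
  PySem.Str.isIn "=" stripped &&
    (PySem.Str.strip (((PySem.Str.splitMax? stripped "=" 1).getD []).getD 1 "") == opener)

-- sum((c == o) - (c == cl) for c in line)
def pvDelta (line : String) (o cl : Char) : Int :=
  (line.toList.map (fun c => (if c = o then (1 : Int) else 0) - (if c = cl then (1 : Int) else 0))).sum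

-- pass 1: cumulative (brace, bracket) levels AFTER each line
def pvLevelsB (block_lines : List String) : List (Int × Int) :=
  (block_lines.foldl
    (fun (acc : List (Int × Int) × Int × Int) line =>
      let stripped := PySem.Str.strip line
      let lv := if stripped ≠ "" ∧ PySem.Str.startswith stripped "#" = false then
          (acc.2.1 + pvDelta line '{' '}', acc.2.2 + pvDelta line '[' ']')
        else (acc.2.1, acc.2.2)
      (acc.1 ++ [lv], lv.1, lv.2))
    (([] : List (Int × Int)), (0 : Int), (0 : Int))).1

-- pass 2 loop body; state = (sections, current)
def pvStepB (st : List (List (String × Int)) × List (String × Int))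
    (p : (Int × String) × (Int × Int)) : List (List (String × Int)) × List (String × Int) :=
  let sections := st.1
  let current := st.2
  let idx := p.1.1
  let line := p.1.2
  let stripped := PySem.Str.strip line
  if stripped = "" then
    (if current ≠ [] then (sections ++ [current], []) else st)
  else if PySem.Str.startswith stripped "#" = true then st
  else
    let brace := p.2.1
    let bracket := p.2.2
    if (brace = 1 ∧ PySem.Str.endswith stripped "{" = true ∧ pvAfterEqualsIs stripped "{" = true)
        ∨ (bracket = 1 ∧ PySem.Str.endswith stripped "[" = true ∧ pvAfterEqualsIs stripped "[" = true) then
      (sections ++ [current ++ [(line, idx)]], [])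
    else
      let s := if current ≠ [] ∧ ((bracket ≥ 1 ∧ stripped = "{") ∨ (brace = 0 ∧ stripped = "}")
          ∨ (bracket = 0 ∧ stripped = "]")) then
          (sections ++ [current], ([] : List (String × Int))) else (sections, current)
      (s.1, s.2 ++ [(line, idx)])

def split_into_code_sections_py_alt (block_lines : List String) : List (List (String × Int)) :=
  let st := ((PySem.List.enumerate block_lines 0).zip (pvLevelsB block_lines)).foldl pvStepB ([], [])
  if st.2 ≠ [] then st.1 ++ [st.2] else st.1

-- ===== PRECONDITION & SPEC =====
def Spec_split_into_code_sections_py (block_lines : List String) (out : List (List (String × Int))) : Prop := out = split_into_code_sections_py_alt block_lines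
instance (block_lines : List String) (out : List (List (String × Int))) : Decidable (Spec_split_into_code_sections_py block_lines out) := by unfold Spec_split_into_code_sections_py; infer_instance

-- ===== CLAIM (what is proved, stated in full; the proofs are below) =====
def Claim_equal_split_into_code_sections_py : Prop := ∀ (block_lines : List String), Dom_split_into_code_sections_py block_lines → Spec_split_into_code_sections_py block_lines (split_into_code_sections_py block_lines)

-- ===== LEMMAS AND PROOFS =====

-- structural version of pass 1's level table
def pvLevRec (b k : Int) : List String → List (Int × Int)
  | [] => []
  | line :: rest =>
    let stripped := PySem.Str.strip line
    let lv := if stripped ≠ "" ∧ PySem.Str.startswith stripped "#" = false then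
        (b + pvDelta line '{' '}', k + pvDelta line '[' ']')
      else (b, k)
    lv :: pvLevRec lv.1 lv.2 rest

lemma pvLevelsB_foldl (lines : List String) (acc : List (Int × Int)) (b k : Int) :
    (lines.foldl
      (fun (acc : List (Int × Int) × Int × Int) line =>
        let stripped := PySem.Str.strip line
        let lv := if stripped ≠ "" ∧ PySem.Str.startswith stripped "#" = false then
            (acc.2.1 + pvDelta line '{' '}', acc.2.2 + pvDelta line '[' ']')
          else (acc.2.1, acc.2.2)
        (acc.1 ++ [lv], lv.1, lv.2))
      (acc, b, k)).1
    = acc ++ pvLevRec b k lines := by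
  induction lines generalizing acc b k with
  | nil => simp [pvLevRec]
  | cons line rest ih => simp only [List.foldl_cons, pvLevRec]; rw [ih]; simp

lemma pvLevelsB_eq (lines : List String) : pvLevelsB lines = pvLevRec 0 0 lines := by
  unfold pvLevelsB; rw [pvLevelsB_foldl]; simp

-- A's char loop computes the two comprehension sums of B
lemma pvScan_eq (cs : List Char) (b k : Int) :
    cs.foldl pvCharScanA (b, k)
      = (b + (cs.map (fun c => (if c = '{' then (1 : Int) else 0) - (if c = '}' then (1 : Int) else 0))).sum,
         k + (cs.map (fun c => (if c = '[' then (1 : Int) else 0) - (if c = ']' then (1 : Int) else 0))).sum) := by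
  induction cs generalizing b k with
  | nil => simp
  | cons c cs ih =>
    simp only [List.foldl_cons, List.map_cons, List.sum_cons, pvCharScanA]
    split_ifs <;> rw [ih] <;> subst_eqs <;> norm_num <;> ring

-- the three sequential boundary flushes of A collapse to B's single combined flush
lemma pvFlushIf_chain (c1 c2 c3 : Prop) [Decidable c1] [Decidable c2] [Decidable c3]
    (secs : List (List (String × Int))) (cur : List (String × Int)) :
    pvFlushIf c3 (pvFlushIf c2 (pvFlushIf c1 (secs, cur)))
      = if cur ≠ [] ∧ (c1 ∨ c2 ∨ c3) then (secs ++ [cur], []) else (secs, cur) := by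
  unfold pvFlushIf
  split_ifs <;> simp_all

-- one line of A = one line of B, with the level table entry made explicit
lemma pvStep_eq (sections : List (List (String × Int))) (current : List (String × Int))
    (b k i : Int) (line : String) :
    pvStepA (sections, current, b, k) (i, line)
      = (let lv := if PySem.Str.strip line ≠ "" ∧ PySem.Str.startswith (PySem.Str.strip line) "#" = false then
            (b + pvDelta line '{' '}', k + pvDelta line '[' ']')
          else (b, k)
         let s := pvStepB (sections, current) ((i, line), lv)
         (s.1, s.2, lv.1, lv.2)) := by
  have hbr : PySem.Str.strip line = "{" →
      PySem.Chars.isIn ['='] (PySem.Chars.strip line.toList) = false := by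
    intro h
    have ht : (PySem.Str.strip line).toList = "{".toList := by rw [h]
    simp only [PySem.Str.toList_strip] at ht
    rw [ht]; decide
  by_cases h0 : PySem.Str.strip line = ""
  · unfold pvStepA pvStepB
    simp [h0]
    split <;> rfl
  by_cases h1 : PySem.Chars.startswith (PySem.Chars.strip line.toList) ['#'] = true
  · unfold pvStepA pvStepB
    simp [h0, h1]
  have hA1 : pvAfterEqualsIs (PySem.Str.strip line) "{" = true ↔
      (PySem.Chars.isIn ['='] (PySem.Chars.strip line.toList) = true ∧
        pvAfterEqualsA (PySem.Str.strip line) = "{") := by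
    simp [pvAfterEqualsIs, pvAfterEqualsA]
  have hA2 : pvAfterEqualsIs (PySem.Str.strip line) "[" = true ↔
      (PySem.Chars.isIn ['='] (PySem.Chars.strip line.toList) = true ∧
        pvAfterEqualsA (PySem.Str.strip line) = "[") := by
    simp [pvAfterEqualsIs, pvAfterEqualsA]
  have he : (1 ≤ k + (List.map (fun c => (if c = '[' then (1 : Int) else 0) - if c = ']' then 1 else 0) line.toList).sum ∧
        PySem.Str.strip line = "{" ∧
          PySem.Chars.isIn ['='] (PySem.Chars.strip line.toList) = false) ↔
      (1 ≤ k + (List.map (fun c => (if c = '[' then (1 : Int) else 0) - if c = ']' then 1 else 0) line.toList).sum ∧ PySem.Str.strip line = "{") := by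
    constructor
    · rintro ⟨ha, hb, _⟩; exact ⟨ha, hb⟩
    · rintro ⟨ha, hb⟩; exact ⟨ha, hb, hbr hb⟩
  unfold pvStepA pvStepB
  simp only [pvScan_eq, pvDelta]
  simp [h0, h1, pvFlushIf_chain]
  simp only [hA1, hA2, he]
  by_cases hc1 : b + (List.map (fun c => (if c = '{' then (1 : Int) else 0) - if c = '}' then 1 else 0) line.toList).sum = 1 ∧
      PySem.Chars.endswith (PySem.Chars.strip line.toList) ['{'] = true ∧
        (PySem.Chars.isIn ['='] (PySem.Chars.strip line.toList) = true ∧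
          pvAfterEqualsA (PySem.Str.strip line) = "{")
  · simp [hc1]
  by_cases hc2 : k + (List.map (fun c => (if c = '[' then (1 : Int) else 0) - if c = ']' then 1 else 0) line.toList).sum = 1 ∧
      PySem.Chars.endswith (PySem.Chars.strip line.toList) ['['] = true ∧
        (PySem.Chars.isIn ['='] (PySem.Chars.strip line.toList) = true ∧
          pvAfterEqualsA (PySem.Str.strip line) = "[")
  · simp [hc2]
  · simp [hc1, hc2]

lemma pvMain (lines : List String) (i b k : Int)
    (sections : List (List (String × Int))) (current : List (String × Int)) :
    ((PySem.List.enumerate lines i).zip (pvLevRec b k lines)).foldl pvStepB (sections, current)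
      = (((PySem.List.enumerate lines i).foldl pvStepA (sections, current, b, k)).1,
         ((PySem.List.enumerate lines i).foldl pvStepA (sections, current, b, k)).2.1) := by
  induction lines generalizing i b k sections current with
  | nil => simp [PySem.List.enumerate_nil, pvLevRec]
  | cons line rest ih =>
    rw [PySem.List.enumerate_cons]
    simp only [pvLevRec, List.zip_cons_cons, List.foldl_cons, pvStep_eq]
    exact ih (i + 1) _ _ _ _

-- ===== VERDICT (by name: the statement is the Claim_ definition above) =====
theorem split_into_code_sections_py_spec : Claim_equal_split_into_code_sections_py := by
  intro lines _
  unfold Spec_split_into_code_sections_py split_into_code_sections_py split_into_code_sections_py_alt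
  rw [pvLevelsB_eq, pvMain lines 0 0 0 [] []]
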